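-- pv_equiv track=rewrite | github.com/mapoga/pi-lcd | lcd_menu.py | _items_insert_divs
-- ===== SOURCE A (Python) =====
-- def _items_insert_divs(items, axis, item_div, loop_div, loop):
--     """Return a list of items with inserted dividers
--
--     Parameters:
--         items (list): list of Menu or str
--         item_div (str): String representing the item divider
--         loop_div (str): String representing the loop divider
--         loop (bool): True if menu is looping
--
--     Returns:
--         list: list of items
--     """
--
--
--     complete_list = []
--     for idx, item in enumerate(items):
--
--         # Insert item
--         complete_list.append(item)
--
--         if (idx < (len(items) - 1)):
--             # Insert item divider
--             complete_list.append(item_div)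
--
--     if loop == True:
--         # Insert loop dividier
--         complete_list.append(loop_div)
--
--     return complete_list
-- ===== SOURCE B (Python) =====
-- def _items_insert_divs(items, axis, item_div, loop_div, loop):
--     # Preallocate a slot array of dividers of length 2n-1 and overwrite
--     # the even slots with the items via one slice assignment.
--     n = len(items)
--     complete_list = [item_div] * (2 * n - 1) if n else []
--     complete_list[0::2] = items
--     if loop == True:
--         complete_list.append(loop_div)
--     return complete_list
-- ===== Notes on version B (the rewrite author's own statement) =====
-- stated objective: alternative
-- what changed: Instead of a conditional append per index, B preallocates a slot array of 2n-1 dividers and overwrites the even slots with the items via one slice assignment, then appends loop_div as before.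
import Mathlib
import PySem

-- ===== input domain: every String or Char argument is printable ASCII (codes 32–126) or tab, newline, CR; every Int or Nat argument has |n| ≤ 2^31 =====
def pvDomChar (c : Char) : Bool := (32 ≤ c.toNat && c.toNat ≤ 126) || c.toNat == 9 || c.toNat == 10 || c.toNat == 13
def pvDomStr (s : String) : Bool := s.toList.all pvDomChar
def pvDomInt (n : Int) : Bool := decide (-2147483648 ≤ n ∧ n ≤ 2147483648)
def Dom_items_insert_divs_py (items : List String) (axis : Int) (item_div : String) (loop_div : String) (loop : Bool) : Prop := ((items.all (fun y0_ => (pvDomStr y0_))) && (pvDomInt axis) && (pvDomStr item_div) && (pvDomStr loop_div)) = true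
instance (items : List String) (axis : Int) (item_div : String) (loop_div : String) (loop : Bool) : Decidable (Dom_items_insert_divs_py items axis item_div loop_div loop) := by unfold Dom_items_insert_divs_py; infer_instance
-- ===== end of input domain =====

-- ===== PORT A =====
-- B builds a preallocated slot array (even slots = items, odd slots = item_div) instead of a per-index branch (objective: alternative).
def items_insert_divs_py (items : List String) (axis : Int) (item_div : String) (loop_div : String) (loop : Bool) : List String :=
  let complete_list : List String :=
    (PySem.List.enumerate items).foldl (fun acc p =>
      let acc := acc ++ [p.2]
      if p.1 < (items.length : Int) - 1 then acc ++ [item_div] else acc) []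
  if loop == true then complete_list ++ [loop_div] else complete_list

-- ===== PORT B =====
-- The Python slice assignment complete_list[0::2] = items on the divider array is ported as
-- constructing the length-(2n-1) list whose even slot i holds items[i/2] and whose odd slots hold item_div (exact for n = len(items)).
def items_insert_divs_py_alt (items : List String) (axis : Int) (item_div : String) (loop_div : String) (loop : Bool) : List String :=
  let n := items.length
  let complete_list : List String :=
    if n ≠ 0 then
      (List.range (2 * n - 1)).map (fun i => if i % 2 == 0 then items.getD (i / 2) "" else item_div)
    else []
  if loop == true then complete_list ++ [loop_div] else complete_list

-- ===== PRECONDITION & SPEC =====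
def Spec_items_insert_divs_py (items : List String) (axis : Int) (item_div : String) (loop_div : String) (loop : Bool) (out : List String) : Prop := out = items_insert_divs_py_alt items axis item_div loop_div loop
instance (items : List String) (axis : Int) (item_div : String) (loop_div : String) (loop : Bool) (out : List String) : Decidable (Spec_items_insert_divs_py items axis item_div loop_div loop out) := by unfold Spec_items_insert_divs_py; infer_instance

-- ===== CLAIM (what is proved, stated in full; the proofs are below) =====
def Claim_equal_items_insert_divs_py : Prop := ∀ (items : List String) (axis : Int) (item_div : String) (loop_div : String) (loop : Bool), Dom_items_insert_divs_py items axis item_div loop_div loop → Spec_items_insert_divs_py items axis item_div loop_div loop (items_insert_divs_py items axis item_div loop_div loop)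

-- ===== LEMMAS AND PROOFS =====

-- ===== VERDICT (by name: the statement is the Claim_ definition above) =====
theorem items_insert_divs_py_core (d : String) :
    ∀ (xs : List String) (s : Int) (acc : List String) (L : Int), s + xs.length = L →
    (PySem.List.enumerate xs s).foldl (fun acc p =>
      let acc := acc ++ [p.2]
      if p.1 < L - 1 then acc ++ [d] else acc) acc
    = acc ++ (xs.flatMap (fun it => [it, d])).dropLast := by
  intro xs
  induction xs with
  | nil => intro s acc L h; simp [PySem.List.enumerate_nil]
  | cons x xs ih =>
    intro s acc L h
    cases xs with
    | nil =>
      simp only [PySem.List.enumerate_cons, PySem.List.enumerate_nil, List.foldl_cons,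
        List.foldl_nil, List.flatMap_cons, List.flatMap_nil, List.append_nil]
      have hlt : ¬ (s < L - 1) := by simp at h; omega
      simp [hlt]
    | cons y ys =>
      rw [PySem.List.enumerate_cons, List.foldl_cons]
      have hlt : s < L - 1 := by simp at h; omega
      show List.foldl _ (if s < L - 1 then acc ++ [x] ++ [d] else acc ++ [x]) _ = _
      rw [if_pos hlt, ih (s + 1) (acc ++ [x] ++ [d]) L (by simp at h ⊢; omega)]
      simp

theorem items_insert_divs_py_slots (d : String) :
    ∀ (xs : List String), xs ≠ [] →
    (List.range (2 * xs.length - 1)).map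
      (fun i => if i % 2 == 0 then xs.getD (i / 2) "" else d)
    = (xs.flatMap (fun it => [it, d])).dropLast := by
  intro xs
  induction xs with
  | nil => intro h; exact absurd rfl h
  | cons x xs ih =>
    intro _
    cases xs with
    | nil => simp [List.range_one]
    | cons y ys =>
      have hlen : 2 * (x :: y :: ys).length - 1 = (2 * (y :: ys).length - 1) + 1 + 1 := by
        simp; omega
      rw [hlen, List.range_succ_eq_map, List.range_succ_eq_map]
      simp only [List.map_cons, List.map_map]
      have hfun : ((fun i => if i % 2 == 0 then (x :: y :: ys).getD (i / 2) "" else d) ∘ Nat.succ ∘ Nat.succ)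
          = (fun i => if i % 2 == 0 then (y :: ys).getD (i / 2) "" else d) := by
        funext i
        simp only [Function.comp]
        have h2 : (i + 1 + 1) % 2 = i % 2 := by omega
        have h3 : (i + 1 + 1) / 2 = i / 2 + 1 := by omega
        simp [Nat.succ_eq_add_one, h2, h3]
      rw [hfun, ih (by simp)]
      have hne : ((y :: ys).flatMap (fun it => [it, d])) ≠ [] := by simp
      simp only [Nat.succ_eq_add_one, List.flatMap_cons, List.cons_append, List.nil_append]
      simp [List.getD]

theorem items_insert_divs_py_spec : Claim_equal_items_insert_divs_py := by
  intro items axis item_div loop_div loop _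
  show items_insert_divs_py items axis item_div loop_div loop
      = items_insert_divs_py_alt items axis item_div loop_div loop
  unfold items_insert_divs_py items_insert_divs_py_alt
  cases items with
  | nil => simp [PySem.List.enumerate_nil]
  | cons x xs =>
    rw [items_insert_divs_py_core item_div (x :: xs) 0 [] ((x :: xs).length : Int) (by simp)]
    rw [← items_insert_divs_py_slots item_div (x :: xs) (by simp)]
    simp
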